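-- pv_equiv track=rewrite | github.com/netsky-lab/agent-experiment-os | src/experiment_os/services/agent_presentation.py | _knowledge_boundaries
-- ===== SOURCE A (Python) =====
-- from typing import Any
--
-- def _knowledge_boundaries(pages: list[dict[str, Any]]) -> dict[str, list[str]]:
--     return {
--         "decision_capable": [
--             page["id"]
--             for page in pages
--             if page.get("status") == "accepted" and page.get("type") in {"policy", "intervention"}
--         ],
--         "domain_context": [
--             page["id"]
--             for page in pages
--             if page.get("status") == "accepted" and page.get("type") == "knowledge_card"
--         ],
--         "evidence_only": [
--             page["id"]
--             for page in pages
--             if page.get("type") in {"source", "claim"} or page.get("status") != "accepted"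
--         ],
--     }
-- ===== SOURCE B (Python) =====
-- _ACCEPTED_BUCKET = {
--     "policy": "decision_capable",
--     "intervention": "decision_capable",
--     "knowledge_card": "domain_context",
--     "source": "evidence_only",
--     "claim": "evidence_only",
-- }
--
-- def _knowledge_boundaries(pages):
--     # Stage 1: table-driven labelling — each page gets at most one (bucket, id) tag.
--     labeled = []
--     for page in pages:
--         if page.get("status") == "accepted":
--             bucket = _ACCEPTED_BUCKET.get(page.get("type"))
--         else:
--             bucket = "evidence_only"
--         if bucket is not None:
--             labeled.append((bucket, page["id"]))
--     # Stage 2: group the tagged ids into the three buckets.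
--     out = {"decision_capable": [], "domain_context": [], "evidence_only": []}
--     for bucket, pid in labeled:
--         out[bucket].append(pid)
--     return out
-- ===== Notes on version B (the rewrite author's own statement) =====
-- stated objective: alternative
-- what changed: Replaces A's three filtered comprehensions (boolean conditions, three passes) by a table-driven two-stage pipeline: a lookup table maps each accepted page's type to its bucket name, producing a list of (bucket, id) tags, which a second grouping pass folds into the three lists.
-- outside the precondition, e.g. on _knowledge_boundaries([{'status': 'accepted', 'type': 'policy'}]): A raises KeyError, B raises KeyError
import Mathlib
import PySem

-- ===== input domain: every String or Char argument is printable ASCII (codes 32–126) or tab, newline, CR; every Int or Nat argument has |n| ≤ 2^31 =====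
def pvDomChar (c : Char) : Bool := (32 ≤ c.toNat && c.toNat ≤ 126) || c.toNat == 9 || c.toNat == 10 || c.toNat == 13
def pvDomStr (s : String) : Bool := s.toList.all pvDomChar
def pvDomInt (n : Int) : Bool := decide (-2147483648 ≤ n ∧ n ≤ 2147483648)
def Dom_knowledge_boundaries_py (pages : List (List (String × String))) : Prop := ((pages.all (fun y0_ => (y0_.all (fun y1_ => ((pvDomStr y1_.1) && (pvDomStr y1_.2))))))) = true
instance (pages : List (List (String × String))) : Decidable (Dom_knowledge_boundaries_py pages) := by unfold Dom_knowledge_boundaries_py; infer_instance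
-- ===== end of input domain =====

-- B replaces A's three filtered comprehensions by a table-driven two-stage pipeline:
-- a bucket-lookup table labels each page with (bucket, id), then a grouping pass folds
-- the tags into the three lists. Return-value equivalence on Pre_ (every selected page has "id").


-- ===== PORT A =====
-- page["id"]: under Pre_ the key is present on every selected page; .getD "" is exact there
def knowledge_boundaries_py (pages : List (List (String × String))) : List (String × List String) :=
  [("decision_capable",
     (pages.filter (fun page =>
        (PySem.Dict.mk page).get? "status" == some "accepted" &&
        ((PySem.Dict.mk page).get? "type" == some "policy" || (PySem.Dict.mk page).get? "type" == some "intervention"))).map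
       (fun page => ((PySem.Dict.mk page).get? "id").getD "")),
   ("domain_context",
     (pages.filter (fun page =>
        (PySem.Dict.mk page).get? "status" == some "accepted" &&
        (PySem.Dict.mk page).get? "type" == some "knowledge_card")).map
       (fun page => ((PySem.Dict.mk page).get? "id").getD "")),
   ("evidence_only",
     (pages.filter (fun page =>
        ((PySem.Dict.mk page).get? "type" == some "source" || (PySem.Dict.mk page).get? "type" == some "claim") ||
        !((PySem.Dict.mk page).get? "status" == some "accepted"))).map
       (fun page => ((PySem.Dict.mk page).get? "id").getD ""))]

-- ===== PORT B =====
def kbTable : PySem.Dict String String :=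
  PySem.Dict.mk [("policy", "decision_capable"), ("intervention", "decision_capable"),
                 ("knowledge_card", "domain_context"), ("source", "evidence_only"),
                 ("claim", "evidence_only")]

-- bucket = _ACCEPTED_BUCKET.get(page.get("type")) if accepted else "evidence_only"
def kbBucket (page : List (String × String)) : Option String :=
  if (PySem.Dict.mk page).get? "status" == some "accepted" then
    match (PySem.Dict.mk page).get? "type" with
    | some t => kbTable.get? t
    | none => none
  else
    some "evidence_only"

-- stage 1: labeled.append((bucket, page["id"])) when bucket is not None
def kbLabel (acc : List (String × String)) (page : List (String × String)) : List (String × String) :=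
  match kbBucket page with
  | some b => acc ++ [(b, ((PySem.Dict.mk page).get? "id").getD "")]
  | none => acc

-- stage 2: out[bucket].append(pid)
def knowledge_boundaries_py_alt (pages : List (List (String × String))) : List (String × List String) :=
  let labeled := pages.foldl kbLabel []
  let out := labeled.foldl (fun d p => d.modify p.1 [] (· ++ [p.2]))
    (PySem.Dict.mk [("decision_capable", ([] : List String)), ("domain_context", []), ("evidence_only", [])])
  out.items

-- ===== PRECONDITION & SPEC =====
-- Pre_ excludes exactly the inputs where Python A raises KeyError: a page selected by
-- one of the three conditions but lacking the "id" key.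
def Pre_knowledge_boundaries_py (pages : List (List (String × String))) : Prop :=
  ∀ page ∈ pages,
    (((PySem.Dict.mk page).get? "status" == some "accepted" &&
        ((PySem.Dict.mk page).get? "type" == some "policy" || (PySem.Dict.mk page).get? "type" == some "intervention")) ||
     ((PySem.Dict.mk page).get? "status" == some "accepted" && (PySem.Dict.mk page).get? "type" == some "knowledge_card") ||
     (((PySem.Dict.mk page).get? "type" == some "source" || (PySem.Dict.mk page).get? "type" == some "claim") ||
        !((PySem.Dict.mk page).get? "status" == some "accepted"))) = true →
    ((PySem.Dict.mk page).get? "id").isSome = true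
instance (pages : List (List (String × String))) : Decidable (Pre_knowledge_boundaries_py pages) := by unfold Pre_knowledge_boundaries_py; infer_instance
def pvWitness_knowledge_boundaries_py : (List (List (String × String))) :=
  [[("id", "p1"), ("status", "accepted"), ("type", "policy")],
   [("id", "p2"), ("status", "draft"), ("type", "claim")]]
def Spec_knowledge_boundaries_py (pages : List (List (String × String))) (out : List (String × List String)) : Prop := out = knowledge_boundaries_py_alt pages
instance (pages : List (List (String × String))) (out : List (String × List String)) : Decidable (Spec_knowledge_boundaries_py pages out) := by unfold Spec_knowledge_boundaries_py; infer_instance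

-- ===== CLAIM (what is proved, stated in full; the proofs are below) =====
def Claim_equal_knowledge_boundaries_py : Prop := ∀ (pages : List (List (String × String))), Dom_knowledge_boundaries_py pages → Pre_knowledge_boundaries_py pages → Spec_knowledge_boundaries_py pages (knowledge_boundaries_py pages)

-- ===== LEMMAS AND PROOFS =====

-- the four possible outcomes of the bucket table, phrased as A's three conditions
lemma kbBucket_dec (page : List (String × String))
    (h : ((PySem.Dict.mk page).get? "status" == some "accepted" &&
        ((PySem.Dict.mk page).get? "type" == some "policy" || (PySem.Dict.mk page).get? "type" == some "intervention")) = true) :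
    kbBucket page = some "decision_capable" := by
  simp only [Bool.and_eq_true, Bool.or_eq_true, beq_iff_eq] at h
  rcases h with ⟨hs, ht⟩
  rcases ht with ht | ht <;>
    simp [kbBucket, hs, ht, kbTable, PySem.Dict.get?_mk_cons]

lemma kbBucket_dom (page : List (String × String))
    (h : ((PySem.Dict.mk page).get? "status" == some "accepted" &&
        (PySem.Dict.mk page).get? "type" == some "knowledge_card") = true) :
    kbBucket page = some "domain_context" := by
  simp only [Bool.and_eq_true, beq_iff_eq] at h
  rcases h with ⟨hs, ht⟩
  simp [kbBucket, hs, ht, kbTable, PySem.Dict.get?_mk_cons]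

lemma kbBucket_ev (page : List (String × String))
    (h : (((PySem.Dict.mk page).get? "type" == some "source" || (PySem.Dict.mk page).get? "type" == some "claim") ||
        !((PySem.Dict.mk page).get? "status" == some "accepted")) = true) :
    kbBucket page = some "evidence_only" := by
  simp only [Bool.or_eq_true, Bool.not_eq_eq_eq_not, Bool.not_true, beq_iff_eq, beq_eq_false_iff_ne] at h
  rcases h with (ht | ht) | hs
  · by_cases hs : (PySem.Dict.mk page).get? "status" = some "accepted" <;>
      simp [kbBucket, hs, ht, kbTable, PySem.Dict.get?_mk_cons]
  · by_cases hs : (PySem.Dict.mk page).get? "status" = some "accepted" <;>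
      simp [kbBucket, hs, ht, kbTable, PySem.Dict.get?_mk_cons]
  · simp [kbBucket, hs]

lemma kbBucket_none (page : List (String × String))
    (h1 : ((PySem.Dict.mk page).get? "status" == some "accepted" &&
        ((PySem.Dict.mk page).get? "type" == some "policy" || (PySem.Dict.mk page).get? "type" == some "intervention")) = false)
    (h2 : ((PySem.Dict.mk page).get? "status" == some "accepted" &&
        (PySem.Dict.mk page).get? "type" == some "knowledge_card") = false)
    (h3 : (((PySem.Dict.mk page).get? "type" == some "source" || (PySem.Dict.mk page).get? "type" == some "claim") ||
        !((PySem.Dict.mk page).get? "status" == some "accepted")) = false) :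
    kbBucket page = none := by
  have hs : (PySem.Dict.mk page).get? "status" = some "accepted" := by
    by_contra hs
    simp [hs] at h3
  simp only [hs, beq_self_eq_true, Bool.true_and, Bool.or_eq_false_iff, beq_eq_false_iff_ne] at h1 h2 h3
  rcases h1 with ⟨hp, hi⟩
  cases hT : (PySem.Dict.mk page).get? "type" with
  | none => simp [kbBucket, hs, hT]
  | some t =>
    rw [hT] at hp hi h2 h3
    have hp' : "policy" ≠ t := fun e => hp (by rw [e])
    have hi' : "intervention" ≠ t := fun e => hi (by rw [e])
    have hk' : "knowledge_card" ≠ t := fun e => h2 (by rw [e])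
    have hsrc' : "source" ≠ t := fun e => h3.1.1 (by rw [e])
    have hcl' : "claim" ≠ t := fun e => h3.1.2 (by rw [e])
    unfold kbBucket
    rw [hs, hT]
    simp [kbTable, hp', hi', hk', hsrc', hcl', PySem.Dict.get?]

-- the labelling fold with a starting accumulator
lemma kbLabel_acc (pages : List (List (String × String))) :
    ∀ acc, pages.foldl kbLabel acc = acc ++ pages.foldl kbLabel [] := by
  induction pages with
  | nil => simp
  | cons page rest ih =>
    intro acc
    rw [List.foldl_cons, List.foldl_cons, ih, ih (kbLabel [] page)]
    unfold kbLabel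
    cases kbBucket page <;> simp

-- the combined pipeline: labelling then grouping, as the three filtered lists
lemma kb_pipeline (pages : List (List (String × String))) :
    ∀ d c e : List String,
      ((pages.foldl kbLabel []).foldl (fun d p => d.modify p.1 [] (· ++ [p.2]))
          (PySem.Dict.mk [("decision_capable", d), ("domain_context", c), ("evidence_only", e)])).items =
        [("decision_capable", d ++ (pages.filter (fun page =>
            (PySem.Dict.mk page).get? "status" == some "accepted" &&
            ((PySem.Dict.mk page).get? "type" == some "policy" || (PySem.Dict.mk page).get? "type" == some "intervention"))).map
            (fun page => ((PySem.Dict.mk page).get? "id").getD "")),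
         ("domain_context", c ++ (pages.filter (fun page =>
            (PySem.Dict.mk page).get? "status" == some "accepted" &&
            (PySem.Dict.mk page).get? "type" == some "knowledge_card")).map
            (fun page => ((PySem.Dict.mk page).get? "id").getD "")),
         ("evidence_only", e ++ (pages.filter (fun page =>
            ((PySem.Dict.mk page).get? "type" == some "source" || (PySem.Dict.mk page).get? "type" == some "claim") ||
            !((PySem.Dict.mk page).get? "status" == some "accepted"))).map
            (fun page => ((PySem.Dict.mk page).get? "id").getD ""))] := by
  induction pages with
  | nil => intro d c e; simp
  | cons page rest ih =>
    intro d c e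
    rw [List.foldl_cons, kbLabel_acc]
    by_cases h1 : ((PySem.Dict.mk page).get? "status" == some "accepted" &&
        ((PySem.Dict.mk page).get? "type" == some "policy" || (PySem.Dict.mk page).get? "type" == some "intervention")) = true
    · have h2 : ((PySem.Dict.mk page).get? "status" == some "accepted" &&
          (PySem.Dict.mk page).get? "type" == some "knowledge_card") = false := by
        simp only [Bool.and_eq_true, Bool.or_eq_true, beq_iff_eq] at h1 ⊢
        rcases h1 with ⟨hs, ht⟩
        rcases ht with ht | ht <;> simp [ht]
      have h3 : (((PySem.Dict.mk page).get? "type" == some "source" || (PySem.Dict.mk page).get? "type" == some "claim") ||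
          !((PySem.Dict.mk page).get? "status" == some "accepted")) = false := by
        simp only [Bool.and_eq_true, Bool.or_eq_true, beq_iff_eq] at h1
        rcases h1 with ⟨hs, ht⟩
        rcases ht with ht | ht <;> simp [ht, hs]
      rw [kbLabel, kbBucket_dec page h1]
      simp only [List.nil_append, List.foldl_append, List.foldl_cons, List.foldl_nil]
      have : (PySem.Dict.mk [("decision_capable", d), ("domain_context", c), ("evidence_only", e)]).modify
          "decision_capable" [] (· ++ [((PySem.Dict.mk page).get? "id").getD ""]) =
          PySem.Dict.mk [("decision_capable", d ++ [((PySem.Dict.mk page).get? "id").getD ""]), ("domain_context", c), ("evidence_only", e)] := by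
        simp [PySem.Dict.modify, PySem.Dict.contains, PySem.Dict.getD, PySem.Dict.get?, PySem.Dict.insert]
      rw [this, ih]
      simp [h1, h2, h3]
    · by_cases h2 : ((PySem.Dict.mk page).get? "status" == some "accepted" &&
          (PySem.Dict.mk page).get? "type" == some "knowledge_card") = true
      · have h3 : (((PySem.Dict.mk page).get? "type" == some "source" || (PySem.Dict.mk page).get? "type" == some "claim") ||
            !((PySem.Dict.mk page).get? "status" == some "accepted")) = false := by
          simp only [Bool.and_eq_true, beq_iff_eq] at h2
          rcases h2 with ⟨hs, ht⟩
          simp [ht, hs]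
        rw [kbLabel, kbBucket_dom page h2]
        simp only [List.nil_append, List.foldl_append, List.foldl_cons, List.foldl_nil]
        have : (PySem.Dict.mk [("decision_capable", d), ("domain_context", c), ("evidence_only", e)]).modify
            "domain_context" [] (· ++ [((PySem.Dict.mk page).get? "id").getD ""]) =
            PySem.Dict.mk [("decision_capable", d), ("domain_context", c ++ [((PySem.Dict.mk page).get? "id").getD ""]), ("evidence_only", e)] := by
          simp [PySem.Dict.modify, PySem.Dict.contains, PySem.Dict.getD, PySem.Dict.get?, PySem.Dict.insert]
        rw [this, ih]
        simp [h1, h2, h3]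
      · by_cases h3 : (((PySem.Dict.mk page).get? "type" == some "source" || (PySem.Dict.mk page).get? "type" == some "claim") ||
            !((PySem.Dict.mk page).get? "status" == some "accepted")) = true
        · rw [kbLabel, kbBucket_ev page h3]
          simp only [List.nil_append, List.foldl_append, List.foldl_cons, List.foldl_nil]
          have : (PySem.Dict.mk [("decision_capable", d), ("domain_context", c), ("evidence_only", e)]).modify
              "evidence_only" [] (· ++ [((PySem.Dict.mk page).get? "id").getD ""]) =
              PySem.Dict.mk [("decision_capable", d), ("domain_context", c), ("evidence_only", e ++ [((PySem.Dict.mk page).get? "id").getD ""])] := by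
            simp [PySem.Dict.modify, PySem.Dict.contains, PySem.Dict.getD, PySem.Dict.get?, PySem.Dict.insert]
          rw [this, ih]
          simp [h1, h2, h3]
        · rw [kbLabel, kbBucket_none page (by simpa using h1) (by simpa using h2) (by simpa using h3)]
          simp only [List.nil_append]
          rw [ih]
          simp [h1, h2, h3]

-- ===== VERDICT (by name: the statement is the Claim_ definition above) =====
theorem knowledge_boundaries_py_spec : Claim_equal_knowledge_boundaries_py := by
  intro pages _ _
  unfold Spec_knowledge_boundaries_py knowledge_boundaries_py knowledge_boundaries_py_alt
  rw [kb_pipeline]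
  simp
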